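-- pv_equiv track=rewrite | github.com/irenepisani/WSD-system | WSD system/WSD_system.py | min_edithdistance
-- ===== SOURCE A (Python) =====
-- def min_edithdistance (lista): #trovo il senso la cui definizione ha edit distance minore con il contesto
-- 	lista_ED=[]
-- 	for item in lista:
-- 		var = item[2]
-- 		lista_ED.append(var)
-- 	min_ED = min(lista_ED)
-- 	for item in lista:
-- 		if item[2]==min_ED:
-- 			usem=item[0]
-- 	return usem
-- ===== SOURCE B (Python) =====
-- def min_edithdistance(lista):
--     best_first, best_ed = lista[0][0], lista[0][2]
--     for item in lista[1:]:
--         if item[2] <= best_ed: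
--             best_ed, best_first = item[2], item[0]
--     return best_first
-- ===== Notes on version B (the rewrite author's own statement) =====
-- stated objective: simpler
-- what changed: Replaced A's three passes (build a list of distances, take its min, rescan for the last item matching it) by a single pass keeping a running minimum and its last holder (update on <= so ties resolve to the last item, as in A's overwrite).
import Mathlib
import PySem

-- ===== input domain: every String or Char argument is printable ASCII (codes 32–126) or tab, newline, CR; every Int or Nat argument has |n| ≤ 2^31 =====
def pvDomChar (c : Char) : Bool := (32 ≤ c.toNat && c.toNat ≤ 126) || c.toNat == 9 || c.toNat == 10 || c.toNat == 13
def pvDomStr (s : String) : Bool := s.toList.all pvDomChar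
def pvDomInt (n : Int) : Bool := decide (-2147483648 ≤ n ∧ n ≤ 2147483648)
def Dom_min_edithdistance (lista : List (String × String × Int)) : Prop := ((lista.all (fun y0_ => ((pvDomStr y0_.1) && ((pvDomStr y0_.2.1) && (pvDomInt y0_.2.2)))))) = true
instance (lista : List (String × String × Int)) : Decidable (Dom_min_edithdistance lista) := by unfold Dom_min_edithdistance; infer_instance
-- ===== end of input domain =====

-- B replaces A's three passes (collect distances, min, rescan for the last match) by one
-- pass keeping the running minimum and its last holder (update on <=, so ties go to the
-- last item exactly as A's overwrite does); objective: simpler (one pass, no auxiliary list).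

-- ===== PORT A =====
def min_edithdistance (lista : List (String × String × Int)) : String :=
  let lista_ED := lista.foldl (fun acc item => acc ++ [item.2.2]) ([] : List Int)
  match PySem.List.min? lista_ED (fun x => x) with
  | none => ""   -- min([]) raises ValueError: excluded by Pre_
  | some min_ED =>
      (lista.foldl (fun usem item => if item.2.2 == min_ED then some item.1 else usem)
        (none : Option String)).getD ""   -- none = 'usem' unbound (unreachable once min exists)

-- ===== PORT B =====
def altLoop (bed : Int) (bf : String) : List (String × String × Int) → String
  | [] => bf
  | it :: rest => if it.2.2 ≤ bed then altLoop it.2.2 it.1 rest else altLoop bed bf rest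

def min_edithdistance_alt (lista : List (String × String × Int)) : String :=
  match lista with
  | [] => ""   -- lista[0] raises IndexError: excluded by Pre_
  | it :: rest => altLoop it.2.2 it.1 rest

-- ===== PRECONDITION & SPEC =====
-- On the empty list A raises ValueError (min of an empty sequence); B raises IndexError there.
def Pre_min_edithdistance (lista : List (String × String × Int)) : Prop := lista ≠ []
instance (lista : List (String × String × Int)) : Decidable (Pre_min_edithdistance lista) := by
  unfold Pre_min_edithdistance; infer_instance

def pvWitness_min_edithdistance : (List (String × String × Int)) :=
  [("cat", "x", 3), ("dog", "y", 1), ("eel", "z", 1)]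

def Spec_min_edithdistance (lista : List (String × String × Int)) (out : String) : Prop := out = min_edithdistance_alt lista
instance (lista : List (String × String × Int)) (out : String) : Decidable (Spec_min_edithdistance lista out) := by unfold Spec_min_edithdistance; infer_instance

-- ===== CLAIM (what is proved, stated in full; the proofs are below) =====
def Claim_equal_min_edithdistance : Prop := ∀ (lista : List (String × String × Int)), Dom_min_edithdistance lista → Pre_min_edithdistance lista → Spec_min_edithdistance lista (min_edithdistance lista)

-- ===== LEMMAS AND PROOFS =====

-- A's last-match rescan, starting from 'unbound'
def pvRes (m : Int) (l : List (String × String × Int)) : Option String :=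
  l.foldl (fun usem item => if item.2.2 == m then some item.1 else usem) none

-- running minimum of the third components, seeded with b
def pvMin (b : Int) (l : List (String × String × Int)) : Int :=
  (l.map (fun it => it.2.2)).foldl min b

theorem pvMin_cons (b : Int) (it : String × String × Int) (r : List (String × String × Int)) :
    pvMin b (it :: r) = pvMin (min b it.2.2) r := by
  simp [pvMin]

theorem pvMin_le (l : List (String × String × Int)) (b : Int) : pvMin b l ≤ b := by
  induction l generalizing b with
  | nil => simp [pvMin]
  | cons it r ih =>
      rw [pvMin_cons]
      exact le_trans (ih (min b it.2.2)) (min_le_left _ _)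

-- the rescan fold from an arbitrary accumulator, in terms of the fold from none
theorem pvRes_shift (m : Int) (l : List (String × String × Int)) (a : Option String) :
    l.foldl (fun usem item => if item.2.2 == m then some item.1 else usem) a
      = (pvRes m l).elim a some := by
  induction l generalizing a with
  | nil => simp [pvRes]
  | cons it r ih =>
      simp only [pvRes, List.foldl_cons] at ih ⊢
      by_cases h : (it.2.2 == m) = true
      · rw [if_pos h, if_pos h, ih (some it.1), ih none]
        cases r.foldl (fun usem item => if item.2.2 == m then some item.1 else usem) none <;> rfl
      · rw [if_neg h, if_neg h, ih a, ih none]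

-- if the running minimum strictly drops below the seed, it is attained, so the rescan finds it
theorem pvRes_isSome (l : List (String × String × Int)) (b : Int) (h : pvMin b l < b) :
    (pvRes (pvMin b l) l).isSome := by
  induction l generalizing b with
  | nil => simp [pvMin] at h
  | cons it r ih =>
      rw [pvMin_cons] at *
      simp only [pvRes, List.foldl_cons]
      rw [pvRes_shift]
      by_cases hlt : pvMin (min b it.2.2) r < min b it.2.2
      · have := ih (min b it.2.2) hlt
        cases hr : pvRes (pvMin (min b it.2.2) r) r with
        | none => rw [hr] at this; simp at this
        | some s => simp
      · have h1 : pvMin (min b it.2.2) r ≤ min b it.2.2 := pvMin_le _ _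
        have h2 : pvMin (min b it.2.2) r = min b it.2.2 := le_antisymm h1 (not_lt.mp hlt)
        have h3 : min b it.2.2 = it.2.2 := by omega
        have h4 : (it.2.2 == pvMin (min b it.2.2) r) = true := by
          rw [h2, h3]; simp
        rw [h4]
        cases pvRes (pvMin (min b it.2.2) r) r <;> simp

-- B's loop equals A's rescan for the running minimum, with bf as the unmatched default
theorem altLoop_eq (l : List (String × String × Int)) (bed : Int) (bf : String) :
    altLoop bed bf l = (pvRes (pvMin bed l) l).getD bf := by
  induction l generalizing bed bf with
  | nil => simp [altLoop, pvRes, pvMin]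
  | cons it r ih =>
      rw [pvMin_cons]
      simp only [pvRes, List.foldl_cons]
      rw [pvRes_shift]
      by_cases hle : it.2.2 ≤ bed
      · have hm : min bed it.2.2 = it.2.2 := by omega
        rw [hm]
        simp only [altLoop, if_pos hle]
        rw [ih]
        cases hr : pvRes (pvMin it.2.2 r) r with
        | some s => simp
        | none =>
            have heq : pvMin it.2.2 r = it.2.2 := by
              by_contra hne
              have : pvMin it.2.2 r < it.2.2 :=
                lt_of_le_of_ne (pvMin_le _ _) hne
              have := pvRes_isSome r it.2.2 this
              rw [hr] at this; simp at this
            simp [heq]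
      · have hm : min bed it.2.2 = bed := by omega
        rw [hm]
        simp only [altLoop, if_neg hle]
        rw [ih]
        have hne : (it.2.2 == pvMin bed r) = false := by
          have : pvMin bed r ≤ bed := pvMin_le _ _
          simp; omega
        rw [hne]
        cases pvRes (pvMin bed r) r <;> simp

theorem edList_eq (l : List (String × String × Int)) (acc : List Int) :
    l.foldl (fun acc item => acc ++ [item.2.2]) acc = acc ++ l.map (fun it => it.2.2) := by
  induction l generalizing acc with
  | nil => simp
  | cons it r ih => simp [ih]

-- ===== VERDICT (by name: the statement is the Claim_ definition above) =====
theorem min_edithdistance_spec : Claim_equal_min_edithdistance := by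
  intro lista _ hpre
  unfold Spec_min_edithdistance
  cases lista with
  | nil => exact absurd rfl hpre
  | cons it rest =>
      unfold min_edithdistance min_edithdistance_alt
      rw [edList_eq]
      simp only [List.nil_append, List.map_cons]
      rw [PySem.List.min?_id_cons]
      have hmin : (rest.map (fun it => it.2.2)).foldl min it.2.2 = pvMin it.2.2 rest := rfl
      rw [hmin]
      simp only [List.foldl_cons]
      rw [pvRes_shift, altLoop_eq]
      cases hr : pvRes (pvMin it.2.2 rest) rest with
      | some s => simp
      | none =>
          have heq : pvMin it.2.2 rest = it.2.2 := by
            by_contra hne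
            have : pvMin it.2.2 rest < it.2.2 := lt_of_le_of_ne (pvMin_le _ _) hne
            have := pvRes_isSome rest it.2.2 this
            rw [hr] at this; simp at this
          simp [heq]
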